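-- pv_equiv track=rewrite | github.com/AllenNeuralDynamics/aind-exaspim-data-transformation | src/aind_exaspim_data_transformation/compress/imaris_to_zarr.py | enumerate_shard_indices
-- ===== SOURCE A (Python) =====
-- import math
-- from typing import Any, Dict, Iterator, List, Optional, Tuple, cast
--
-- def compute_shard_grid(
--     data_shape: Tuple[int, int, int],
--     shard_shape: Tuple[int, int, int],
-- ) -> Tuple[int, int, int]:
--     """
--     Compute the number of shards in each dimension.
--
--     Parameters
--     ----------
--     data_shape : Tuple[int, ...]
--         Shape of the full dataset.
--     shard_shape : Tuple[int, ...]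
--         Shape of each shard.
--
--     Returns
--     -------
--     Tuple[int, ...]
--         Number of shards in each dimension (ceiling division).
--
--     Examples
--     --------
--     >>> compute_shard_grid((768, 2688, 3584), (256, 256, 256))
--     (3, 11, 14)
--     """
--     z = math.ceil(data_shape[0] / shard_shape[0])
--     y = math.ceil(data_shape[1] / shard_shape[1])
--     x = math.ceil(data_shape[2] / shard_shape[2])
--     return (z, y, x)
--
-- def enumerate_shard_indices(
--     data_shape: Tuple[int, int, int],
--     shard_shape: Tuple[int, int, int],
-- ) -> List[Tuple[int, int, int]]:
--     """
--     Generate all shard indices for a dataset.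
--
--     Parameters
--     ----------
--     data_shape : Tuple[int, ...]
--         Shape of the full dataset.
--     shard_shape : Tuple[int, ...]
--         Shape of each shard.
--
--     Returns
--     -------
--     List[Tuple[int, ...]]
--         List of all shard indices in row-major (Z, Y, X) order.
--
--     Examples
--     --------
--     >>> enumerate_shard_indices((512, 512, 512), (256, 256, 256))
--     [(0, 0, 0), (0, 0, 1), (0, 1, 0), (0, 1, 1), (1, 0, 0), (1, 0, 1), (1, 1, 0), (1, 1, 1)]
--     """
--     grid = compute_shard_grid(data_shape, shard_shape)
--     indices: List[Tuple[int, int, int]] = []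
--     for z in range(grid[0]):
--         for y in range(grid[1]):
--             for x in range(grid[2]):
--                 indices.append((z, y, x))
--     return indices
-- ===== SOURCE B (Python) =====
-- def enumerate_shard_indices(data_shape, shard_shape):
--     # grid via exact integer ceiling division; one flat pass with divmod decoding
--     gz = -(-data_shape[0] // shard_shape[0])
--     gy = -(-data_shape[1] // shard_shape[1])
--     gx = -(-data_shape[2] // shard_shape[2])
--     if gz <= 0 or gy <= 0 or gx <= 0:
--         return []
--     plane = gy * gx
--     out = []
--     for i in range(gz * plane):
--         zi, rem = divmod(i, plane)
--         yi, xi = divmod(rem, gx)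
--         out.append((zi, yi, xi))
--     return out
-- ===== Notes on version B (the rewrite author's own statement) =====
-- stated objective: alternative
-- what changed: Replaces the three nested range loops with a single flat loop over one index i in range(gz*gy*gx), recovering (z,y,x) by divmod against the plane size gy*gx and row size gx; the grid itself is computed by integer ceiling division -(-a//b) instead of math.ceil(a/b).
import Mathlib
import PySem

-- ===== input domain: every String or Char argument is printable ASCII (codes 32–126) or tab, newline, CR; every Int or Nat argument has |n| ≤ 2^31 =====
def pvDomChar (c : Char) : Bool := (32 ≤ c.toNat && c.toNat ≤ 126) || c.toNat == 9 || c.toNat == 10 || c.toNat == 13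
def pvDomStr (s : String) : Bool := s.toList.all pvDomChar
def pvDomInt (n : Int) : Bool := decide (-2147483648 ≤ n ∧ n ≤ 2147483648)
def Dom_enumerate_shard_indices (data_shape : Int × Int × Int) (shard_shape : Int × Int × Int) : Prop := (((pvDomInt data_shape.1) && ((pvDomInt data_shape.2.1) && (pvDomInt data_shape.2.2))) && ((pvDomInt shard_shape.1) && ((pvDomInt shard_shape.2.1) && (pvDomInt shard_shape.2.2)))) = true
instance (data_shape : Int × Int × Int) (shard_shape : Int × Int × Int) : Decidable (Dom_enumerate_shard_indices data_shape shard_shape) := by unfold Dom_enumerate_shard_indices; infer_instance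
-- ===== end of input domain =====

-- B replaces A's three nested loops with one flat loop over a single index decoded by
-- floor-division/modulus (alternative decomposition; same asymptotic cost).


-- ===== PORT A =====
-- math.ceil(a / b) with Python float true division: exact integer ceiling division for
-- |a|,|b| ≤ 2^31 (the double-precision quotient never rounds across an integer there),
-- ported as -((-a) // b) using PySem's Python-exact floor division.
def pyCeilDiv (a b : Int) : Int := -(PySem.Int.floordiv (-a) b)

def compute_shard_grid (data_shape : Int × Int × Int) (shard_shape : Int × Int × Int) : Int × Int × Int :=
  (pyCeilDiv data_shape.1 shard_shape.1,
   pyCeilDiv data_shape.2.1 shard_shape.2.1,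
   pyCeilDiv data_shape.2.2 shard_shape.2.2)

def enumerate_shard_indices (data_shape : Int × Int × Int) (shard_shape : Int × Int × Int) : List (Int × Int × Int) :=
  let grid := compute_shard_grid data_shape shard_shape
  (PySem.List.pyRange 0 grid.1 1).foldl (fun acc z =>
    (PySem.List.pyRange 0 grid.2.1 1).foldl (fun acc y =>
      (PySem.List.pyRange 0 grid.2.2 1).foldl (fun acc x =>
        acc ++ [(z, y, x)]) acc) acc) []

-- ===== PORT B =====
def enumerate_shard_indices_alt (data_shape : Int × Int × Int) (shard_shape : Int × Int × Int) : List (Int × Int × Int) :=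
  let gz := -(PySem.Int.floordiv (-data_shape.1) shard_shape.1)
  let gy := -(PySem.Int.floordiv (-data_shape.2.1) shard_shape.2.1)
  let gx := -(PySem.Int.floordiv (-data_shape.2.2) shard_shape.2.2)
  if gz ≤ 0 ∨ gy ≤ 0 ∨ gx ≤ 0 then []
  else
    let plane := gy * gx
    (PySem.List.pyRange 0 (gz * plane) 1).foldl (fun acc i =>
      let zi := PySem.Int.floordiv i plane
      let rem := PySem.Int.mod i plane
      let yi := PySem.Int.floordiv rem gx
      let xi := PySem.Int.mod rem gx
      acc ++ [(zi, yi, xi)]) []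

-- ===== PRECONDITION & SPEC =====
-- Pre_ excludes exactly the inputs where Python A raises ZeroDivisionError: a zero shard dimension.
def Pre_enumerate_shard_indices (data_shape : Int × Int × Int) (shard_shape : Int × Int × Int) : Prop :=
  shard_shape.1 ≠ 0 ∧ shard_shape.2.1 ≠ 0 ∧ shard_shape.2.2 ≠ 0
instance (data_shape : Int × Int × Int) (shard_shape : Int × Int × Int) : Decidable (Pre_enumerate_shard_indices data_shape shard_shape) := by unfold Pre_enumerate_shard_indices; infer_instance

def pvWitness_enumerate_shard_indices : (Int × Int × Int) × (Int × Int × Int) := ((512, 512, 512), (256, 256, 256))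

def Spec_enumerate_shard_indices (data_shape : Int × Int × Int) (shard_shape : Int × Int × Int) (out : List (Int × Int × Int)) : Prop := out = enumerate_shard_indices_alt data_shape shard_shape
instance (data_shape : Int × Int × Int) (shard_shape : Int × Int × Int) (out : List (Int × Int × Int)) : Decidable (Spec_enumerate_shard_indices data_shape shard_shape out) := by unfold Spec_enumerate_shard_indices; infer_instance

-- ===== CLAIM (what is proved, stated in full; the proofs are below) =====
def Claim_equal_enumerate_shard_indices : Prop := ∀ (data_shape : Int × Int × Int) (shard_shape : Int × Int × Int), Dom_enumerate_shard_indices data_shape shard_shape → Pre_enumerate_shard_indices data_shape shard_shape → Spec_enumerate_shard_indices data_shape shard_shape (enumerate_shard_indices data_shape shard_shape)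

-- ===== LEMMAS AND PROOFS =====

-- Splitting List.range over a product: the flat divmod-decoded pass equals the nested pass.
theorem rangeMulSplit {α : Type} (g : Nat → Nat → α) (nx : Nat) (hx : 0 < nx) :
    ∀ ny : Nat, (List.range (ny * nx)).map (fun j => g (j / nx) (j % nx)) =
      (List.range ny).flatMap (fun y => (List.range nx).map (g y)) := by
  intro ny
  induction ny with
  | zero => simp
  | succ n ih =>
    rw [Nat.succ_mul, List.range_add, List.map_append, ih, List.range_succ,
        List.flatMap_append]
    congr 1
    simp only [List.flatMap_cons, List.flatMap_nil, List.append_nil, List.map_map]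
    apply List.map_congr_left
    intro j hj
    rw [List.mem_range] at hj
    have hd : (n * nx + j) / nx = n := by
      rw [Nat.add_comm, Nat.add_mul_div_right _ _ hx, Nat.div_eq_of_lt hj, Nat.zero_add]
    have hm : (n * nx + j) % nx = j := by
      rw [Nat.add_comm, Nat.add_mul_mod_self_right, Nat.mod_eq_of_lt hj]
    simp [hd, hm]

-- The core identity, stated over an arbitrary grid (gz, gy, gx).
theorem nested_eq_flat (gz gy gx : Int) :
    (PySem.List.pyRange 0 gz 1).foldl (fun acc z =>
      (PySem.List.pyRange 0 gy 1).foldl (fun acc y =>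
        (PySem.List.pyRange 0 gx 1).foldl (fun acc x =>
          acc ++ [(z, y, x)]) acc) acc) ([] : List (Int × Int × Int)) =
    (if gz ≤ 0 ∨ gy ≤ 0 ∨ gx ≤ 0 then [] else
      (PySem.List.pyRange 0 (gz * (gy * gx)) 1).foldl (fun acc i =>
        acc ++ [(PySem.Int.floordiv i (gy * gx),
                 PySem.Int.floordiv (PySem.Int.mod i (gy * gx)) gx,
                 PySem.Int.mod (PySem.Int.mod i (gy * gx)) gx)]) []) := by
  simp only [PySem.List.foldl_append_singleton_eq_map, PySem.List.foldl_append_eq_flatMap,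
    List.nil_append]
  split_ifs with h
  · -- some dimension non-positive: every side collapses to []
    rcases h with h | h | h
    · simp only [PySem.List.pyRange_one_eq_nil h]; simp
    · simp only [PySem.List.pyRange_one_eq_nil h]; simp
    · simp only [PySem.List.pyRange_one_eq_nil h]; simp
  · push Not at h
    obtain ⟨hz, hy, hx⟩ := h
    obtain ⟨nz, rfl⟩ : ∃ n : Nat, gz = (n : Int) := ⟨gz.toNat, (Int.toNat_of_nonneg (by omega)).symm⟩
    obtain ⟨ny, rfl⟩ : ∃ n : Nat, gy = (n : Int) := ⟨gy.toNat, (Int.toNat_of_nonneg (by omega)).symm⟩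
    obtain ⟨nx, rfl⟩ : ∃ n : Nat, gx = (n : Int) := ⟨gx.toNat, (Int.toNat_of_nonneg (by omega)).symm⟩
    have hnx : 0 < nx := by exact_mod_cast hx
    have hny : 0 < ny := by exact_mod_cast hy
    have hp : ((ny : Int) * (nx : Int)) = ((ny * nx : Nat) : Int) := by push_cast; ring
    have ht : ((nz : Int) * ((ny : Int) * (nx : Int))) = ((nz * (ny * nx) : Nat) : Int) := by
      push_cast; ring
    rw [ht, hp]
    simp only [PySem.List.pyRange_one, Int.sub_zero, Int.toNat_natCast, zero_add,
      List.map_map, List.flatMap_map]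
    -- RHS: rewrite Int floordiv/mod on casts into Nat div/mod
    have hmap : ∀ (l : List Nat),
        l.map ((fun i => (PySem.Int.floordiv i ((ny * nx : Nat) : Int),
            PySem.Int.floordiv (PySem.Int.mod i ((ny * nx : Nat) : Int)) (nx : Int),
            PySem.Int.mod (PySem.Int.mod i ((ny * nx : Nat) : Int)) (nx : Int))) ∘ (fun k : Nat => (k : Int))) =
        l.map (fun j => (((j / (ny * nx) : Nat) : Int),
            (((j % (ny * nx)) / nx : Nat) : Int), (((j % (ny * nx)) % nx : Nat) : Int))) := by
      intro l
      apply List.map_congr_left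
      intro j _
      simp only [Function.comp_apply, PySem.Int.floordiv_natCast, PySem.Int.mod_natCast]
    rw [hmap]
    rw [rangeMulSplit (fun a b => ((a : Int), (((b / nx : Nat)) : Int), ((b % nx : Nat) : Int)))
          (ny * nx) (Nat.mul_pos hny hnx) nz]
    apply List.flatMap_congr
    · intro z _
      rw [rangeMulSplit (fun a b => ((z : Int), (a : Int), (b : Int))) nx hnx ny]
      simp only [Function.comp_def]

-- ===== VERDICT (by name: the statement is the Claim_ definition above) =====
theorem enumerate_shard_indices_spec : Claim_equal_enumerate_shard_indices := by
  intro ds ss _ _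
  unfold Spec_enumerate_shard_indices enumerate_shard_indices enumerate_shard_indices_alt
    compute_shard_grid pyCeilDiv
  exact nested_eq_flat _ _ _
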